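-- pv_equiv track=rewrite | github.com/chinuteja/SCALER | MODULE-2/04_Carry Forward/Q2. Special Subsequences AG.py | solve
-- ===== SOURCE A (Python) =====
-- def solve(A):
--
-- 	answer,count_A = 0,0
--
-- 	for i in A:
-- 		if i == "A":
-- 			count_A += 1
-- 		elif i =="G":
-- 			answer += count_A
-- 	return answer
-- ===== SOURCE B (Python) =====
-- def solve(A):
--     # Pass 1: prefix table of cumulative 'A' counts.
--     prefix = []
--     c = 0
--     for x in A:
--         if x == "A":
--             c += 1
--         prefix.append(c)
--     # Pass 2: for each 'G', add the cumulative-A count at its position.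
--     return sum(p for x, p in zip(A, prefix) if x == "G")
-- ===== Notes on version B (the rewrite author's own statement) =====
-- stated objective: alternative
-- what changed: Replaces the single fused accumulator loop by a two-pass scheme: first build a prefix table of cumulative 'A' counts, then sum the table entries at 'G' positions.
import Mathlib
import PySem

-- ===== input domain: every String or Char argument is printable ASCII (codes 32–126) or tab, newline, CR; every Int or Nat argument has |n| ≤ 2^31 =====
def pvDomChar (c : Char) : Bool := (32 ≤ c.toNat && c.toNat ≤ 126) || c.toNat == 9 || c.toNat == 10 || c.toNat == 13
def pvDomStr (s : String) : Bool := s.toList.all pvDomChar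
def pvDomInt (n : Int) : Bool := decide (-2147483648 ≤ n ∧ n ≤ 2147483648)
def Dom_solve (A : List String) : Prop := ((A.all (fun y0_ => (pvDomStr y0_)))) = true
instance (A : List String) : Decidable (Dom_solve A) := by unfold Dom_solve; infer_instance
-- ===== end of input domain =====

-- B builds a prefix table of cumulative 'A' counts, then sums it at 'G' positions; A fuses both into one accumulator loop.

-- ===== PORT A =====
def solve (A : List String) : Int :=
  ((A.foldl (fun (s : Int × Int) i =>
      if i = "A" then (s.1, s.2 + 1)
      else if i = "G" then (s.1 + s.2, s.2)
      else s) (0, 0))).1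

-- ===== PORT B =====
-- pass 1 of Source B: running cumulative 'A' count
def buildPrefix (xs : List String) (c : Int) : List Int :=
  match xs with
  | [] => []
  | x :: xs =>
    let c' := if x = "A" then c + 1 else c
    c' :: buildPrefix xs c'

def solve_alt (A : List String) : Int :=
  (((A.zip (buildPrefix A 0)).filter (fun p => p.1 = "G")).map Prod.snd).sum

-- ===== PRECONDITION & SPEC =====
def Spec_solve (A : List String) (out : Int) : Prop := out = solve_alt A
instance (A : List String) (out : Int) : Decidable (Spec_solve A out) := by unfold Spec_solve; infer_instance

-- ===== CLAIM (what is proved, stated in full; the proofs are below) =====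
def Claim_equal_solve : Prop := ∀ (A : List String), Dom_solve A → Spec_solve A (solve A)

-- ===== LEMMAS AND PROOFS =====
def sumG (A : List String) (c : Int) : Int :=
  (((A.zip (buildPrefix A c)).filter (fun p => p.1 = "G")).map Prod.snd).sum

theorem sumG_nil (c : Int) : sumG [] c = 0 := rfl

theorem sumG_cons (x : String) (xs : List String) (c : Int) :
    sumG (x :: xs) c =
      (if x = "G" then (if x = "A" then c + 1 else c) else 0)
        + sumG xs (if x = "A" then c + 1 else c) := by
  by_cases hG : x = "G"
  · simp only [sumG, buildPrefix, List.zip_cons_cons, List.filter_cons, List.map_cons,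
      List.sum_cons, hG, decide_true, if_true]
  · simp only [sumG, buildPrefix, List.zip_cons_cons, List.filter_cons, hG, decide_false,
      if_false, Bool.false_eq_true]
    rw [zero_add]

theorem solve_key (A : List String) : ∀ (ans c : Int),
    (A.foldl (fun (s : Int × Int) i =>
      if i = "A" then (s.1, s.2 + 1)
      else if i = "G" then (s.1 + s.2, s.2)
      else s) (ans, c)).1 = ans + sumG A c := by
  induction A with
  | nil => intro ans c; rw [List.foldl_nil, sumG_nil, add_zero]
  | cons x xs ih =>
    intro ans c
    rw [List.foldl_cons, sumG_cons]
    by_cases hA : x = "A"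
    · have hG : ¬ x = "G" := by rw [hA]; decide
      simp only [if_pos hA, if_neg hG]
      rw [ih, zero_add]
    · by_cases hG : x = "G"
      · simp only [if_neg hA, if_pos hG]
        rw [ih]; ring
      · simp only [if_neg hA, if_neg hG]
        rw [ih, zero_add]

-- ===== VERDICT (by name: the statement is the Claim_ definition above) =====
theorem solve_spec : Claim_equal_solve := by
  intro A _
  show solve A = solve_alt A
  rw [solve, solve_key]
  exact (zero_add _).trans rfl
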